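-- pv_equiv track=rewrite | github.com/revaagrawal/profile-hmm-4775 | create_hmm.py | get_deletion_columns
-- ===== SOURCE A (Python) =====
-- def get_deletion_columns(sequences):
--     deletions = dict()
--     for s in sequences:
--         for i in range(len(s)):
--             if s[i] == "-":
--                 if i in deletions:
--                     deletions[i] += 1
--                 else:
--                     deletions[i] = 1
--
--     return deletions
-- ===== SOURCE B (Python) =====
-- def get_deletion_columns(sequences):
--     # Divide and conquer: build a one-key-per-gap dict for each single sequence,
--     # then merge halves pairwise by summing counts (dict merge keeps first-occurrence key order).
--     def merge(d1, d2):
--         out = dict(d1)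
--         for k, v in d2.items():
--             out[k] = out.get(k, 0) + v
--         return out
--
--     def solve(lo, hi):
--         if hi - lo == 0:
--             return {}
--         if hi - lo == 1:
--             s = sequences[lo]
--             return {i: 1 for i, ch in enumerate(s) if ch == '-'}
--         mid = (lo + hi) // 2
--         return merge(solve(lo, mid), solve(mid, hi))
--
--     return solve(0, len(sequences))
-- ===== Notes on version B (the rewrite author's own statement) =====
-- stated objective: alternative
-- what changed: A mutates one dict cell-by-cell in a row-major double loop; B is a recursive divide-and-conquer: it builds a per-sequence gap dict by comprehension and merges halves pairwise by summing counts, relying on dict merge preserving first-occurrence key order.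
import Mathlib
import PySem

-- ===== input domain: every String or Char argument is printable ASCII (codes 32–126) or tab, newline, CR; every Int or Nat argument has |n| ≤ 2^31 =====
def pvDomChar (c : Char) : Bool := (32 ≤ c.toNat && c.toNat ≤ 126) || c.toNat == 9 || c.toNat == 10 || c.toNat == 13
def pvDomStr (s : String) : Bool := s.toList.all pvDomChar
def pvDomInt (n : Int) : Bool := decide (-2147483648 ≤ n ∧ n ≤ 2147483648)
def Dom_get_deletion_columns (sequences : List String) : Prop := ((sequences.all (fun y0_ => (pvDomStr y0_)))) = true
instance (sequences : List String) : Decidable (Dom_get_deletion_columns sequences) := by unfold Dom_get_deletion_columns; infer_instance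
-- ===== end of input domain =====

-- B replaces A's row-major cell-by-cell dict accumulation by a recursive divide-and-conquer:
-- per-sequence gap dicts merged pairwise by summing counts (objective: alternative, same result).

-- ===== PORT A =====
-- inner loop 'for i in range(len(s)): if s[i] == "-": …'; s[i] ported as pyGetD with a
-- dummy default — i ∈ range(len(s)) is always in range, so the default is never read.
def get_deletion_columns (sequences : List String) : List (Int × Int) :=
  (sequences.foldl (fun d s =>
      (PySem.List.pyRange 0 (PySem.Str.len s) 1).foldl (fun d i =>
        if PySem.List.pyGetD s.toList i ' ' == '-' then
          (if d.contains i then d.insert i (d.getD i 0 + 1) else d.insert i 1)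
        else d) d)
    (PySem.Dict.empty : PySem.Dict Int Int)).items

-- ===== PORT B =====
-- '{i: 1 for i, ch in enumerate(s) if ch == "-"}'
def pvSeqDict (s : String) : PySem.Dict Int Int :=
  (PySem.List.enumerate s.toList 0).foldl
    (fun d p => if p.2 == '-' then d.insert p.1 1 else d) PySem.Dict.empty

-- 'out = dict(d1); for k, v in d2.items(): out[k] = out.get(k, 0) + v'
def pvMerge (d1 d2 : PySem.Dict Int Int) : PySem.Dict Int Int :=
  d2.items.foldl (fun out p => out.insert p.1 (out.getD p.1 0 + p.2)) d1

-- 'solve(lo, hi)'; 'sequences[lo]' ported as pyGetD with a dummy default — the recursion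
-- only ever reaches lo < len(sequences) here, so the default is never read.
def pvSolve (sequences : List String) (lo hi : Nat) : PySem.Dict Int Int :=
  if hi - lo = 0 then PySem.Dict.empty
  else if hi - lo = 1 then pvSeqDict (PySem.List.pyGetD sequences lo "")
  else
    pvMerge (pvSolve sequences lo ((lo + hi) / 2)) (pvSolve sequences ((lo + hi) / 2) hi)
termination_by hi - lo
decreasing_by all_goals omega

def get_deletion_columns_alt (sequences : List String) : List (Int × Int) :=
  (pvSolve sequences 0 sequences.length).items

-- ===== PRECONDITION & SPEC =====
def Spec_get_deletion_columns (sequences : List String) (out : List (Int × Int)) : Prop := out = get_deletion_columns_alt sequences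
instance (sequences : List String) (out : List (Int × Int)) : Decidable (Spec_get_deletion_columns sequences out) := by unfold Spec_get_deletion_columns; infer_instance

-- ===== CLAIM (what is proved, stated in full; the proofs are below) =====
def Claim_equal_get_deletion_columns : Prop := ∀ (sequences : List String), Dom_get_deletion_columns sequences → Spec_get_deletion_columns sequences (get_deletion_columns sequences)

-- ===== LEMMAS AND PROOFS =====

-- the gap-index list of one sequence
def pvGaps (s : String) : List Int :=
  ((PySem.List.enumerate s.toList 0).filter (fun p => p.2 == '-')).map (·.1)

-- ---- A's side: A's dict is the counter of the flattened gap list ----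

theorem pvStep_eq (d : PySem.Dict Int Int) (i : Int) :
    (if d.contains i then d.insert i (d.getD i 0 + 1) else d.insert i 1) =
      d.insert i (d.getD i 0 + 1) := by
  by_cases h : d.contains i = true
  · simp [h]
  · simp only [Bool.not_eq_true] at h
    rw [if_neg (by simp [h]), PySem.Dict.getD_of_not_contains d 0 h]
    norm_num

theorem pvInner_eq (s : String) (d : PySem.Dict Int Int) :
    (PySem.List.pyRange 0 (PySem.Str.len s) 1).foldl (fun d i =>
        if PySem.List.pyGetD s.toList i ' ' == '-' then
          (if d.contains i then d.insert i (d.getD i 0 + 1) else d.insert i 1)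
        else d) d
      = (pvGaps s).foldl (fun d i => d.insert i (d.getD i 0 + 1)) d := by
  rw [PySem.List.foldl_if_eq_foldl_filter]
  have h1 : (PySem.List.pyRange 0 (PySem.Str.len s) 1).filter
      (fun i => PySem.List.pyGetD s.toList i ' ' == '-') = pvGaps s := by
    rw [pvGaps, PySem.List.enumerate_eq_map_pyRange s.toList ' ', List.filter_map, List.map_map]
    simp [PySem.Str.len, Function.comp_def]
  rw [h1]
  exact PySem.List.foldl_congr_mem _ _ _ _ (fun acc x _ => pvStep_eq acc x)

theorem pvFoldl_flatMap {α β γ : Type} (g : α → List β) (f : γ → β → γ) :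
    ∀ (l : List α) (d : γ),
      l.foldl (fun d s => (g s).foldl f d) d = (l.flatMap g).foldl f d := by
  intro l
  induction l with
  | nil => intro d; rfl
  | cons x t ih => intro d; simp [List.flatMap_cons, List.foldl_append, ih]

theorem pvA_eq_counter (sequences : List String) :
    get_deletion_columns sequences =
      (PySem.Dict.counter (sequences.flatMap pvGaps)).items := by
  unfold get_deletion_columns
  rw [PySem.List.foldl_congr_mem sequences _
        (fun d s => (pvGaps s).foldl (fun d i => d.insert i (d.getD i 0 + 1)) d)
        PySem.Dict.empty (fun d s _ => pvInner_eq s d)]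
  rw [pvFoldl_flatMap, PySem.Dict.foldl_insert_getD_add_one_eq_counter]

-- ---- B's side ----

-- the gap list of one sequence has no duplicate indices
theorem pvGaps_nodup (s : String) : (pvGaps s).Nodup := by
  rw [pvGaps, PySem.List.enumerate_eq_map_pyRange s.toList ' ', List.filter_map, List.map_map]
  simp only [Function.comp_def, List.map_id_fun', id]
  exact List.filter_sublist.nodup (PySem.List.nodup_pyRange_one _ _)

-- the per-sequence dict comprehension is the counter of that sequence's gap list
theorem pvSeqDict_eq_counter (s : String) :
    pvSeqDict s = PySem.Dict.counter (pvGaps s) := by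
  have hL : pvSeqDict s = (pvGaps s).foldl (fun d i => d.insert i 1) PySem.Dict.empty := by
    rw [pvSeqDict, PySem.List.foldl_if_eq_foldl_filter, pvGaps, List.foldl_map]
  rw [hL]
  apply PySem.Dict.ext
  rw [PySem.Dict.items_foldl_insert_fresh (pvGaps s) (fun i => i) (fun _ => (1 : Int))
        PySem.Dict.empty (by intro a _; rfl) (by simpa using pvGaps_nodup s)]
  rw [PySem.Dict.items_counter]
  simp only [PySem.Set.ofList_eq_self_of_nodup (pvGaps s) (pvGaps_nodup s)]
  show List.map (fun a => (a, (1 : Int))) (pvGaps s)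
      = List.map (fun k => (k, ((pvGaps s).count k : Int))) (pvGaps s)
  apply List.map_congr_left
  intro i hi
  simp [List.count_eq_one_of_mem (pvGaps_nodup s) hi]

-- value of B's merge fold at any key
theorem pvFoldl_insert_pairs_getD (ps : List (Int × Int)) :
    ∀ (d : PySem.Dict Int Int) (k : Int),
      (ps.foldl (fun out p => out.insert p.1 (out.getD p.1 0 + p.2)) d).getD k 0
        = d.getD k 0 + ((ps.filter (fun p => p.1 == k)).map (·.2)).sum := by
  induction ps with
  | nil => intro d k; simp
  | cons p t ih =>
      intro d k
      simp only [List.foldl_cons, List.filter_cons]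
      rw [ih]
      by_cases h : p.1 = k
      · subst h
        rw [PySem.Dict.getD_insert_self]
        simp
        ring
      · rw [PySem.Dict.getD_insert_of_ne d _ _ (Ne.symm h)]
        simp [h]

-- merging the counter of l into d is the counting loop over l continued from d
theorem pvMerge_counter (l : List Int) (d : PySem.Dict Int Int) (hd : d.keys.Nodup) :
    pvMerge d (PySem.Dict.counter l)
      = l.foldl (fun d x => d.modify x 0 (· + 1)) d := by
  apply PySem.Dict.ext
  have hkL : (pvMerge d (PySem.Dict.counter l)).keys = PySem.Set.update d.keys l := by
    rw [pvMerge, PySem.Dict.keys_foldl_insert_key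
          (key := fun p : Int × Int => p.1)
          (f := fun out p => out.getD p.1 0 + p.2)]
    rw [PySem.Dict.items_counter, List.map_map]
    have : ((PySem.Set.ofList l).map ((fun p : Int × Int => p.1) ∘ fun k => (k, (l.count k : Int))))
        = PySem.Set.ofList l := by simp [Function.comp_def]
    rw [this, PySem.Set.update_eq_append_filter, PySem.Set.update_eq_append_filter,
        PySem.Set.ofList_ofList]
  have hkR : (l.foldl (fun d x => d.modify x 0 (· + 1)) d).keys = PySem.Set.update d.keys l :=
    PySem.Dict.keys_foldl_modify l 0 (fun _ _ v => v + 1) d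
  have hnL : (pvMerge d (PySem.Dict.counter l)).keys.Nodup := by
    rw [pvMerge]
    exact PySem.Dict.nodup_keys_foldl_insert_key _ _ _ _ hd
  have hnR : (l.foldl (fun d x => d.modify x 0 (· + 1)) d).keys.Nodup :=
    PySem.Dict.nodup_keys_foldl_modify_key l (fun x => x) 0 (fun _ _ v => v + 1) d hd
  rw [PySem.Dict.items_eq_map_keys _ hnL 0, PySem.Dict.items_eq_map_keys _ hnR 0, hkL, hkR]
  apply List.map_congr_left
  intro k _
  congr 1
  rw [PySem.Dict.getD_foldl_modify_add_one]
  rw [pvMerge, pvFoldl_insert_pairs_getD]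
  congr 1
  rw [PySem.Dict.items_counter, List.filter_map]
  have hf : (PySem.Set.ofList l).filter
      ((fun p : Int × Int => p.1 == k) ∘ fun k' => (k', (l.count k' : Int)))
      = (PySem.Set.ofList l).filter (fun k' => k' == k) := by
    simp [Function.comp_def]
  rw [hf, List.filter_beq]
  by_cases h : k ∈ l
  · rw [List.count_eq_one_of_mem (PySem.Set.nodup_ofList l) (by simpa [PySem.Set.mem_ofList] using h)]
    simp
  · rw [List.count_eq_zero_of_not_mem (by simpa [PySem.Set.mem_ofList] using h),
        List.count_eq_zero_of_not_mem h]
    simp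

-- merge of two counters is the counter of the concatenation
theorem pvMerge_counter_counter (l1 l2 : List Int) :
    pvMerge (PySem.Dict.counter l1) (PySem.Dict.counter l2)
      = PySem.Dict.counter (l1 ++ l2) := by
  rw [pvMerge_counter l2 _ (PySem.Dict.nodup_keys_counter l1),
      PySem.Dict.counter_eq_foldl, PySem.Dict.counter_eq_foldl,
      List.foldl_append]

-- solve(lo, hi) is the counter of the gaps of the segment sequences[lo:hi]
theorem pvSolve_eq_counter (sequences : List String) :
    ∀ (n lo hi : Nat), hi - lo ≤ n → hi ≤ sequences.length →
      pvSolve sequences lo hi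
        = PySem.Dict.counter (((sequences.drop lo).take (hi - lo)).flatMap pvGaps) := by
  intro n
  induction n with
  | zero =>
      intro lo hi h _
      rw [pvSolve]
      simp [Nat.le_zero.mp h, PySem.Dict.counter_eq_foldl]
  | succ m ih =>
      intro lo hi h hlen
      rw [pvSolve]
      by_cases h0 : hi - lo = 0
      · simp [h0, PySem.Dict.counter_eq_foldl]
      · by_cases h1 : hi - lo = 1
        · have hlo : lo < sequences.length := by omega
          rw [if_neg h0, if_pos h1, h1]
          rw [List.drop_eq_getElem_cons hlo, List.take_succ_cons, List.take_zero]
          rw [pvSeqDict_eq_counter, PySem.List.pyGetD_natCast]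
          simp [List.getD, List.getElem?_eq_getElem hlo]
        · rw [if_neg h0, if_neg h1]
          have hmid1 : (lo + hi) / 2 - lo ≤ m := by omega
          have hmid2 : hi - (lo + hi) / 2 ≤ m := by omega
          rw [ih lo ((lo + hi) / 2) hmid1 (by omega), ih ((lo + hi) / 2) hi hmid2 hlen]
          rw [pvMerge_counter_counter, ← List.flatMap_append]
          congr 1
          rw [show sequences.drop ((lo + hi) / 2)
                = (sequences.drop lo).drop ((lo + hi) / 2 - lo) by
              rw [List.drop_drop]; congr 1; omega]
          have hsum : ((lo + hi) / 2 - lo) + (hi - (lo + hi) / 2) = hi - lo := by omega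
          rw [← List.take_add, hsum]

-- ===== VERDICT (by name: the statement is the Claim_ definition above) =====
theorem get_deletion_columns_spec : Claim_equal_get_deletion_columns := by
  intro sequences _
  show get_deletion_columns sequences = get_deletion_columns_alt sequences
  rw [pvA_eq_counter, get_deletion_columns_alt,
      pvSolve_eq_counter sequences sequences.length 0 sequences.length (by omega) (by omega)]
  simp
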